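-- pv_equiv track=rewrite | github.com/vmueller71/code-challenges | robot_attack/solution.py | kill_robot
-- ===== SOURCE A (Python) =====
-- def kill_robot(robots, idx):
--     robots[idx] = 0
--     if idx:
--         if robots[idx - 1] > 2:
--             robots[idx - 1] -= 2
--         elif robots[idx - 1] in [1, 2]:
--             robots = kill_robot(robots, idx-1)
--     if idx < len(robots) - 1:
--         if robots[idx + 1] > 2:
--             robots[idx + 1] -= 2
--         elif robots[idx + 1] in [1, 2]:
--             robots = kill_robot(robots, idx+1)
--
--     return robots
-- ===== SOURCE B (Python) =====
-- def kill_robot(robots, idx):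
--     # Iterative version: zero the cell, then run the two independent cascades
--     # (leftward and rightward) as explicit while loops, mutating in place.
--     robots[idx] = 0
--     i = idx - 1
--     while i >= 0:
--         if robots[i] > 2:
--             robots[i] -= 2
--             break
--         elif robots[i] in (1, 2):
--             robots[i] = 0
--             i -= 1
--         else:
--             break
--     i = idx + 1
--     n = len(robots)
--     while i < n:
--         if robots[i] > 2:
--             robots[i] -= 2
--             break
--         elif robots[i] in (1, 2):
--             robots[i] = 0
--             i += 1
--         else:
--             break
--     return robots
-- ===== Notes on version B (the rewrite author's own statement) =====
-- stated objective: alternative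
-- what changed: Replaces the bidirectional recursion with two independent explicit while loops (leftward then rightward scan), exploiting that a freshly zeroed cell blocks the cascade from crossing back.
-- outside the precondition, e.g. on kill_robot([3, 1, 2], -1): A returns [0, 0, 0], B returns [1, 1, 0]
import Mathlib
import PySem

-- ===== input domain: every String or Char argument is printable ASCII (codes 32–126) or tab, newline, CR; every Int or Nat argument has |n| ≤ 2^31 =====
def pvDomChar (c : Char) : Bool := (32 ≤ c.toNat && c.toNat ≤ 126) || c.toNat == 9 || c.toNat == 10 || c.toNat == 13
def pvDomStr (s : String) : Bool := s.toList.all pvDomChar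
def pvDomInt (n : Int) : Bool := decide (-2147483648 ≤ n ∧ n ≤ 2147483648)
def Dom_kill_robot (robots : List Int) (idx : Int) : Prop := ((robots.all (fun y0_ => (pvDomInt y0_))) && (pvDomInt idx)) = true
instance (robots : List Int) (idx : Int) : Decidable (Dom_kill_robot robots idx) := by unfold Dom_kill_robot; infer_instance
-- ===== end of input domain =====

-- B replaces A's bidirectional recursion by two explicit one-directional scans (same cost);
-- equivalence is about the returned list (both Pythons also mutate `robots` identically in place).


-- ===== PORT A =====
-- A's recursion, with the index as a Nat (Pre_ restricts to 0 ≤ idx < len).  Each recursive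
-- call zeroes a previously nonzero cell, so `robots.length + 1` fuel provably never runs out
-- inside Pre_ (the equivalence proof shows the fuel case is never reached there).
def killA (fuel : Nat) (robots : List Int) (j : Nat) : List Int :=
  match fuel with
  | 0 => robots
  | f + 1 =>
    let r1 := robots.set j 0                               -- robots[idx] = 0
    let r2 :=
      if j ≠ 0 then                                        -- if idx:
        let v := r1.getD (j - 1) 0
        if v > 2 then r1.set (j - 1) (v - 2)               -- robots[idx-1] -= 2
        else if v = 1 ∨ v = 2 then killA f r1 (j - 1)      -- recurse left
        else r1
      else r1
    if (j : Int) < (r2.length : Int) - 1 then              -- if idx < len(robots) - 1: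
      let v := r2.getD (j + 1) 0
      if v > 2 then r2.set (j + 1) (v - 2)                 -- robots[idx+1] -= 2
      else if v = 1 ∨ v = 2 then killA f r2 (j + 1)        -- recurse right
      else r2
    else r2

def kill_robot (robots : List Int) (idx : Int) : List Int :=
  -- totality guard only: Pre_ restricts to 0 ≤ idx < len, where this is A verbatim
  if 0 ≤ idx ∧ idx < robots.length then killA (robots.length + 1) robots idx.toNat
  else robots

-- ===== PORT B =====
-- Source B's first while loop: `k` is the count of cells still left of the scan point,
-- i.e. the next examined index is k-1 (loop guard `i >= 0`).
def leftLoop (r : List Int) : Nat → List Int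
  | 0 => r
  | i + 1 =>
    let v := r.getD i 0
    if v > 2 then r.set i (v - 2)
    else if v = 1 ∨ v = 2 then leftLoop (r.set i 0) i
    else r

-- Source B's second while loop, scanning right from i while i < n.
def rightLoop (r : List Int) (i : Nat) : List Int :=
  if i < r.length then
    let v := r.getD i 0
    if v > 2 then r.set i (v - 2)
    else if v = 1 ∨ v = 2 then rightLoop (r.set i 0) (i + 1)
    else r
  else r
termination_by r.length - i
decreasing_by simp; omega

def kill_robot_alt (robots : List Int) (idx : Int) : List Int :=
  -- totality guard only: Pre_ restricts to 0 ≤ idx < len, where this is Source B verbatim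
  if 0 ≤ idx ∧ idx < robots.length then
    let j := idx.toNat
    rightLoop (leftLoop (robots.set j 0) j) (j + 1)
  else robots

-- ===== PRECONDITION & SPEC =====
-- Pre_ keeps exactly the natural domain 0 ≤ idx < len(robots): outside it A either raises
-- IndexError (|idx| > len) or, for negative in-range idx, returns a value produced by Python's
-- negative-index wraparound — an accident outside the task's natural domain (see cites).
def Pre_kill_robot (robots : List Int) (idx : Int) : Prop :=
  0 ≤ idx ∧ idx < robots.length
instance (robots : List Int) (idx : Int) : Decidable (Pre_kill_robot robots idx) := by
  unfold Pre_kill_robot; infer_instance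

def pvWitness_kill_robot : List Int × Int := ([3, 1, 2, 5], 1)

def Spec_kill_robot (robots : List Int) (idx : Int) (out : List Int) : Prop := out = kill_robot_alt robots idx
instance (robots : List Int) (idx : Int) (out : List Int) : Decidable (Spec_kill_robot robots idx out) := by unfold Spec_kill_robot; infer_instance

-- ===== CLAIM (what is proved, stated in full; the proofs are below) =====
def Claim_equal_kill_robot : Prop := ∀ (robots : List Int) (idx : Int), Dom_kill_robot robots idx → Pre_kill_robot robots idx → Spec_kill_robot robots idx (kill_robot robots idx)

-- ===== LEMMAS AND PROOFS =====

theorem leftLoop_length (k : Nat) : ∀ (r : List Int), (leftLoop r k).length = r.length := by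
  induction k with
  | zero => intro r; rfl
  | succ i ih =>
    intro r
    simp only [leftLoop]
    split
    · simp
    · split
      · rw [ih]; simp
      · rfl

theorem leftLoop_getD_ge (k : Nat) : ∀ (r : List Int) (m : Nat), k ≤ m →
    (leftLoop r k).getD m 0 = r.getD m 0 := by
  induction k with
  | zero => intro r m _; rfl
  | succ i ih =>
    intro r m hm
    simp only [leftLoop]
    split
    · rw [List.getD, List.getD, List.getElem?_set_ne (by omega)]; rfl
    · split
      · rw [ih _ _ (by omega), List.getD, List.getD, List.getElem?_set_ne (by omega)]
      · rfl

-- A's left cascade equals Source B's left loop when the cell right of j is already 0 (or absent):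
-- the right-hand part of each recursive call is then a no-op.
theorem killA_left (j : Nat) : ∀ (f : Nat) (r : List Int), j < r.length →
    (j + 1 = r.length ∨ r.getD (j + 1) 0 = 0) → j + 1 ≤ f →
    killA f r j = leftLoop (r.set j 0) j := by
  induction j with
  | zero =>
    intro f r hlen hC hf
    match f, hf with
    | f + 1, _ =>
      simp only [killA, leftLoop, if_neg (by omega : ¬ ((0:Nat) ≠ 0))]
      split
      · rename_i h
        have h1 : (r.set 0 0).getD 1 0 = 0 := by
          rcases hC with hC | hC
          · rw [List.getD]; rw [List.getElem?_eq_none (by simp; omega)]; rfl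
          · rw [List.getD, List.getElem?_set_ne (by omega)]; exact hC
        rw [h1]
        norm_num
      · rfl
  | succ i ih =>
    intro f r hlen hC hf
    match f, hf with
    | f + 1, _ =>
      simp only [killA, leftLoop, if_pos (by omega : (i + 1 : Nat) ≠ 0), Nat.add_sub_cancel]
      -- the left-hand handling
      have hset1 : (r.set (i+1) 0).getD (i + 1 + 1) 0 = r.getD (i + 1 + 1) 0 := by
        rw [List.getD, List.getD, List.getElem?_set_ne (by omega)]
      set r1 := r.set (i + 1) 0 with hr1
      have hr1len : r1.length = r.length := by simp [hr1]
      by_cases hv2 : r1.getD i 0 > 2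
      · -- decrement branch: r2 = r1.set i (v-2); right part must be skipped
        rw [if_pos hv2]
        split
        · rename_i hcond
          -- right part active: value at i+2 is 0 → both inner ifs false
          have hz : ((r1.set i (r1.getD i 0 - 2)).getD (i + 1 + 1) 0) = 0 := by
            rw [List.getD, List.getElem?_set_ne (by omega), ← List.getD]
            rw [hset1]
            rcases hC with hC | hC
            · exfalso; simp [hr1len] at hcond; omega
            · exact hC
          rw [hz]; norm_num
        · rfl
      · rw [if_neg hv2]
        by_cases hv12 : r1.getD i 0 = 1 ∨ r1.getD i 0 = 2
        · rw [if_pos hv12]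
          have hrec : killA f r1 i = leftLoop (r1.set i 0) i := by
            apply ih f r1 (by omega)
            · right
              rw [hr1, List.getD, List.getElem?_set_self (by omega)]; rfl
            · omega
          rw [hrec]
          -- right part on r2 = leftLoop (r1.set i 0) i : value at i+2 is 0 or absent
          have hlen2 : (leftLoop (r1.set i 0) i).length = r.length := by
            rw [leftLoop_length]; simp [hr1]
          split
          · rename_i hcond
            have hz : (leftLoop (r1.set i 0) i).getD (i + 1 + 1) 0 = 0 := by
              rw [leftLoop_getD_ge i _ _ (by omega), List.getD, List.getElem?_set_ne (by omega),
                ← List.getD, hset1]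
              rcases hC with hC | hC
              · exfalso; rw [hlen2] at hcond; omega
              · exact hC
            rw [hz]; norm_num
          · rfl
        · rw [if_neg hv12]
          split
          · rename_i hcond
            have hz : r1.getD (i + 1 + 1) 0 = 0 := by
              rw [hset1]
              rcases hC with hC | hC
              · exfalso; rw [hr1len] at hcond; omega
              · exact hC
            rw [hz]; norm_num
          · rfl

-- A's right cascade equals Source B's right loop when the cell left of j is already 0 (or j = 0).
theorem killA_right (r : List Int) (j : Nat) (f : Nat) (hlen : j < r.length)
    (hC : j = 0 ∨ r.getD (j - 1) 0 = 0) (hf : r.length - j ≤ f) :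
    killA f r j = rightLoop (r.set j 0) (j + 1) := by
  induction f generalizing r j with
  | zero => omega
  | succ f ih =>
    simp only [killA]
    set r1 := r.set j 0 with hr1
    have hr1len : r1.length = r.length := by simp [hr1]
    have hleft : (if j ≠ 0 then
        let v := r1.getD (j - 1) 0
        if v > 2 then r1.set (j - 1) (v - 2)
        else if v = 1 ∨ v = 2 then killA f r1 (j - 1)
        else r1
      else r1) = r1 := by
      split
      · rename_i hj
        have hz : r1.getD (j - 1) 0 = 0 := by
          rw [hr1, List.getD, List.getElem?_set_ne (by omega), ← List.getD]
          rcases hC with hC | hC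
          · omega
          · exact hC
        rw [hz]; norm_num
      · rfl
    rw [hleft]
    rw [rightLoop]
    by_cases hcond : j + 1 < r1.length
    · rw [if_pos (by exact_mod_cast (by omega : (j:Int) < (r1.length:Int) - 1)),
        if_pos hcond]
      by_cases hv2 : r1.getD (j + 1) 0 > 2
      · rw [if_pos hv2, if_pos hv2]
      · rw [if_neg hv2, if_neg hv2]
        by_cases hv12 : r1.getD (j + 1) 0 = 1 ∨ r1.getD (j + 1) 0 = 2
        · rw [if_pos hv12, if_pos hv12]
          apply ih r1 (j + 1) (by omega)
          · right
            rw [hr1, Nat.add_sub_cancel, List.getD, List.getElem?_set_self (by omega)]; rfl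
          · omega
        · rw [if_neg hv12, if_neg hv12]
    · rw [if_neg (by exact_mod_cast (by omega : ¬ ((j:Int) < (r1.length:Int) - 1))),
        if_neg hcond]

-- ===== VERDICT (by name: the statement is the Claim_ definition above) =====
theorem kill_robot_spec : Claim_equal_kill_robot := by
  intro robots idx _ hpre
  obtain ⟨h0, h1⟩ := hpre
  unfold Spec_kill_robot kill_robot kill_robot_alt
  rw [if_pos ⟨h0, h1⟩, if_pos ⟨h0, h1⟩]
  have hjlen : idx.toNat < robots.length := by omega
  revert hjlen
  generalize idx.toNat = j
  intro hjlen
  -- unfold the top call of killA once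
  rw [killA]
  set r1 := robots.set j 0 with hr1
  have hr1len : r1.length = robots.length := by simp [hr1]
  have hr1j : r1.getD j 0 = 0 := by
    rw [hr1, List.getD, List.getElem?_set_self (by omega)]; rfl
  -- the left-hand handling equals leftLoop r1 j
  have hleft : (if j ≠ 0 then
      let v := r1.getD (j - 1) 0
      if v > 2 then r1.set (j - 1) (v - 2)
      else if v = 1 ∨ v = 2 then killA robots.length r1 (j - 1)
      else r1
    else r1) = leftLoop r1 j := by
    match j, hr1j with
    | 0, _ => rfl
    | i + 1, hr1j =>
      rw [if_pos (by omega : (i + 1 : Nat) ≠ 0)]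
      simp only [leftLoop, Nat.add_sub_cancel]
      by_cases hv2 : r1.getD i 0 > 2
      · rw [if_pos hv2, if_pos hv2]
      · rw [if_neg hv2, if_neg hv2]
        by_cases hv12 : r1.getD i 0 = 1 ∨ r1.getD i 0 = 2
        · rw [if_pos hv12, if_pos hv12]
          apply killA_left i robots.length r1 (by omega)
          · right; exact hr1j
          · omega
        · rw [if_neg hv12, if_neg hv12]
  rw [hleft]
  set r2 := leftLoop r1 j with hr2
  have hr2len : r2.length = robots.length := by rw [hr2, leftLoop_length, hr1len]
  have hr2j : r2.getD j 0 = 0 := by rw [hr2, leftLoop_getD_ge j _ _ (le_refl j)]; exact hr1j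
  -- the right-hand handling equals rightLoop r2 (j+1)
  rw [rightLoop]
  by_cases hcond : j + 1 < r2.length
  · rw [if_pos (by exact_mod_cast (by omega : (j:Int) < (r2.length:Int) - 1)),
      if_pos hcond]
    by_cases hv2 : r2.getD (j + 1) 0 > 2
    · rw [if_pos hv2, if_pos hv2]
    · rw [if_neg hv2, if_neg hv2]
      by_cases hv12 : r2.getD (j + 1) 0 = 1 ∨ r2.getD (j + 1) 0 = 2
      · rw [if_pos hv12, if_pos hv12]
        apply killA_right r2 (j + 1) robots.length (by omega)
        · right; rw [Nat.add_sub_cancel]; exact hr2j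
        · omega
      · rw [if_neg hv12, if_neg hv12]
  · rw [if_neg (by exact_mod_cast (by omega : ¬ ((j:Int) < (r2.length:Int) - 1))),
      if_neg hcond]
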